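-- pv_equiv track=rewrite | github.com/manwar/perlweeklychallenge-club | challenge-302/robert-mcintosh/python/ch-1.py | return_subset
-- ===== SOURCE A (Python) =====
-- from itertools import combinations
--
-- def return_subset(strs: list[list], x: int, y: int) -> int | None:
--     for r in range(len(strs) - 1, 1, -1):
--         subsets = combinations(strs, r)
--         for subset in subsets:
--             total_zeros = 0
--             total_ones = 0
--             for element in subset:
--                 total_zeros += element.count('0')
--                 total_ones += element.count('1')
--             if total_zeros <= x and total_ones <= y:
--                 return len(subset)
--     return None
-- ===== SOURCE B (Python) =====
-- def return_subset(strs: list[list], x: int, y: int) -> int | None: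
--     # DP over reachable (zeros, ones) totals keeping the largest subset size for
--     # each pair; feasibility is downward-closed in the size, so the answer is the
--     # best feasible size clamped to [2, len(strs) - 1].
--     best = {(0, 0): 0}
--     for s in strs:
--         z = s.count('0')
--         o = s.count('1')
--         upd = dict(best)
--         for (zz, oo), r in best.items():
--             k = (zz + z, oo + o)
--             if upd.get(k, -1) < r + 1:
--                 upd[k] = r + 1
--         best = upd
--     n = len(strs)
--     res = None
--     for (zz, oo), r in best.items():
--         if zz <= x and oo <= y:
--             c = min(r, n - 1)
--             if c >= 2 and (res is None or c > res):
--                 res = c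
--     return res
-- ===== Notes on version B (the rewrite author's own statement) =====
-- stated objective: alternative
-- what changed: Replaced the descending-size enumeration of all combinations with a dict DP over reachable (zeros, ones) totals keeping the largest subset size per total, then taking the best feasible size clamped to [2, len-1] (feasibility is downward-closed in the size).
import Mathlib
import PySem

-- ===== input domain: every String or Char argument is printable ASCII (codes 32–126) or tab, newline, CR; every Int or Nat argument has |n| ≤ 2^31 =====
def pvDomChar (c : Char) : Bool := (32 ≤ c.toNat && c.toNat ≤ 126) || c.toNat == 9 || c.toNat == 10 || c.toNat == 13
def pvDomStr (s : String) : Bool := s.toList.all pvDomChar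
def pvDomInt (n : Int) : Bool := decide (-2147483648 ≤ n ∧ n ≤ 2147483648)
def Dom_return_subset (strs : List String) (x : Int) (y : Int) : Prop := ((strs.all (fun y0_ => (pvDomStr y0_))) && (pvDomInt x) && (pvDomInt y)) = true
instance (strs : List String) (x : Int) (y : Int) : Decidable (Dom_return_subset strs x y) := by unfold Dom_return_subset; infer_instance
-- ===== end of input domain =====

-- B replaces A's descending enumeration of all combinations by a one-pass DP over
-- reachable (size, zeros, ones) states followed by a max over the feasible sizes.

-- ===== PORT A =====
-- itertools.combinations(l, k) as a list of k-element sublists, in itertools order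
def pvCombos : List String → Nat → List (List String)
  | _, 0 => [[]]
  | [], _ + 1 => []
  | a :: l, k + 1 => ((pvCombos l k).map (fun c => a :: c)) ++ pvCombos l (k + 1)

-- the inner 'for subset in subsets' loop: first feasible subset's length
def pvFindFeasible (x y : Int) : List (List String) → Option Int
  | [] => none
  | c :: rest =>
    let t := c.foldl
      (fun (p : Int × Int) e =>
        (p.1 + (PySem.Str.count e "0" : Int), p.2 + (PySem.Str.count e "1" : Int))) (0, 0)
    if t.1 ≤ x ∧ t.2 ≤ y then some (c.length : Int) else pvFindFeasible x y rest

-- the outer 'for r in range(len(strs)-1, 1, -1)' loop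
def pvOuterA (strs : List String) (x y : Int) : List Int → Option Int
  | [] => none
  | r :: rs =>
    match pvFindFeasible x y (pvCombos strs r.toNat) with
    | some v => some v
    | none => pvOuterA strs x y rs

def return_subset (strs : List String) (x : Int) (y : Int) : Option Int :=
  pvOuterA strs x y (PySem.List.pyRange ((strs.length : Int) - 1) 1 (-1))

-- ===== PORT B =====
-- for (zz, oo), r in best.items(): upd[k] = r + 1 when it improves upd.get(k, -1)
def pvStepD (best : PySem.Dict (Int × Int) Int) (s : String) : PySem.Dict (Int × Int) Int :=
  let z : Int := (PySem.Str.count s "0" : Int)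
  let o : Int := (PySem.Str.count s "1" : Int)
  best.items.foldl (fun upd kv =>
    if upd.getD (kv.1.1 + z, kv.1.2 + o) (-1) < kv.2 + 1
    then upd.insert (kv.1.1 + z, kv.1.2 + o) (kv.2 + 1) else upd) best

-- if zz <= x and oo <= y: c = min(r, n-1); if c >= 2 and (res is None or c > res): res = c
def pvResStep (x y n : Int) (res : Option Int) (kv : (Int × Int) × Int) : Option Int :=
  if kv.1.1 ≤ x ∧ kv.1.2 ≤ y then
    if decide (2 ≤ min kv.2 (n - 1)) && res.all (fun v => decide (v < min kv.2 (n - 1)))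
    then some (min kv.2 (n - 1)) else res
  else res

def return_subset_alt (strs : List String) (x : Int) (y : Int) : Option Int :=
  let best := strs.foldl pvStepD (PySem.Dict.ofList [(((0 : Int), (0 : Int)), (0 : Int))])
  let n : Int := strs.length
  best.items.foldl (pvResStep x y n) none

-- ===== PRECONDITION & SPEC =====
def Spec_return_subset (strs : List String) (x : Int) (y : Int) (out : Option Int) : Prop := out = return_subset_alt strs x y
instance (strs : List String) (x : Int) (y : Int) (out : Option Int) : Decidable (Spec_return_subset strs x y out) := by unfold Spec_return_subset; infer_instance

-- ===== CLAIM (what is proved, stated in full; the proofs are below) =====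
def Claim_equal_return_subset : Prop := ∀ (strs : List String) (x : Int) (y : Int), Dom_return_subset strs x y → Spec_return_subset strs x y (return_subset strs x y)

-- ===== LEMMAS AND PROOFS =====

-- zeros / ones totals of a chosen subset
def pvZ (c : List String) : Int := (c.map (fun e => (PySem.Str.count e "0" : Int))).sum
def pvO (c : List String) : Int := (c.map (fun e => (PySem.Str.count e "1" : Int))).sum

-- the decidable "some subset of size r.toNat is feasible" test, as A's any-scan
def pvQ (strs : List String) (x y r : Int) : Bool :=
  (pvCombos strs r.toNat).any (fun c => decide (pvZ c ≤ x) && decide (pvO c ≤ y))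

theorem pvCombos_mem (l : List String) (k : Nat) (c : List String) :
    c ∈ pvCombos l k ↔ c.Sublist l ∧ c.length = k := by
  induction l generalizing k c with
  | nil =>
    cases k with
    | zero => simp [pvCombos, List.sublist_nil]
    | succ k =>
      simp only [pvCombos, List.not_mem_nil, false_iff]
      rintro ⟨hs, hl⟩
      simp [List.sublist_nil.mp hs] at hl
  | cons a l ih =>
    cases k with
    | zero =>
      simp only [pvCombos, List.mem_singleton, List.length_eq_zero_iff]
      constructor
      · rintro rfl; exact ⟨List.nil_sublist _, rfl⟩
      · rintro ⟨_, rfl⟩; rfl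
    | succ k =>
      simp only [pvCombos, List.mem_append, List.mem_map, ih, List.sublist_cons_iff]
      constructor
      · rintro (⟨c', ⟨hs, hl⟩, rfl⟩ | ⟨hs, hl⟩)
        · exact ⟨Or.inr ⟨c', rfl, hs⟩, by simp [hl]⟩
        · exact ⟨Or.inl hs, hl⟩
      · rintro ⟨hs | ⟨r, rfl, hr⟩, hl⟩
        · exact Or.inr ⟨hs, hl⟩
        · exact Or.inl ⟨r, ⟨hr, by simpa using hl⟩, rfl⟩

theorem pvFold_pair_gen (c : List String) (p q : Int) :
    (c.foldl (fun (p : Int × Int) e =>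
      (p.1 + (PySem.Str.count e "0" : Int), p.2 + (PySem.Str.count e "1" : Int))) (p, q))
    = (p + pvZ c, q + pvO c) := by
  induction c generalizing p q with
  | nil => simp [pvZ, pvO]
  | cons e c ih =>
    simp only [List.foldl_cons, ih, pvZ, pvO, List.map_cons, List.sum_cons]
    simp [add_assoc]

theorem pvFindFeasible_some (x y : Int) (cs : List (List String)) (k : Nat)
    (hlen : ∀ c ∈ cs, c.length = k) :
    pvFindFeasible x y cs = (if ∃ c ∈ cs, pvZ c ≤ x ∧ pvO c ≤ y then some (k : Int) else none) := by
  induction cs with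
  | nil => simp [pvFindFeasible]
  | cons c rest ih =>
    have hc : c.length = k := hlen c (by simp)
    simp only [pvFindFeasible, pvFold_pair_gen, zero_add]
    by_cases h : pvZ c ≤ x ∧ pvO c ≤ y
    · simp [h, hc]
    · have : pvFindFeasible x y rest =
        (if ∃ c ∈ rest, pvZ c ≤ x ∧ pvO c ≤ y then some (k : Int) else none) :=
        ih (fun c hcm => hlen c (by simp [hcm]))
      simp only [if_neg h, this]
      by_cases h2 : ∃ c ∈ rest, pvZ c ≤ x ∧ pvO c ≤ y
      · simp only [if_pos h2]
        rw [if_pos]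
        obtain ⟨c', hm, hf⟩ := h2
        exact ⟨c', by simp [hm], hf⟩
      · rw [if_neg h2, if_neg]
        rintro ⟨c', hm, hf⟩
        rcases List.mem_cons.mp hm with rfl | hm'
        · exact h hf
        · exact h2 ⟨c', hm', hf⟩

-- find? on a strictly descending list: everything above the hit fails the test
theorem pvFind_desc (l : List Int) (p : Int → Bool) (a : Int)
    (hp : l.Pairwise (· > ·)) (h : l.find? p = some a) :
    ∀ b ∈ l, a < b → p b = false := by
  induction l with
  | nil => simp at h
  | cons c l ih =>
    rw [List.find?_cons] at h
    rcases hpc : p c with _ | _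
    · rw [hpc] at h
      intro b hb hab
      rcases List.mem_cons.mp hb with rfl | hb'
      · exact hpc
      · exact ih (List.Pairwise.of_cons hp) h b hb' hab
    · rw [hpc] at h
      injection h with h; subst h
      intro b hb hab
      rcases List.mem_cons.mp hb with rfl | hb'
      · omega
      · exact absurd (List.rel_of_pairwise_cons hp hb') (by omega)

-- A's outer loop is find? over the range, provided every candidate size is ≥ 1
theorem pvOuterA_eq_find (strs : List String) (x y : Int) (rs : List Int)
    (hpos : ∀ r ∈ rs, 1 ≤ r) :
    pvOuterA strs x y rs = rs.find? (pvQ strs x y) := by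
  induction rs with
  | nil => simp [pvOuterA]
  | cons r rs ih =>
    have hr : 1 ≤ r := hpos r (by simp)
    have hlen : ∀ c ∈ pvCombos strs r.toNat, c.length = r.toNat :=
      fun c hc => ((pvCombos_mem strs r.toNat c).mp hc).2
    rw [List.find?_cons]
    simp only [pvOuterA, pvFindFeasible_some x y _ r.toNat hlen]
    by_cases h : ∃ c ∈ pvCombos strs r.toNat, pvZ c ≤ x ∧ pvO c ≤ y
    · have hq : pvQ strs x y r = true := by
        simp only [pvQ, List.any_eq_true]
        obtain ⟨c, hc, h1, h2⟩ := h
        exact ⟨c, hc, by simp [h1, h2]⟩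
      rw [if_pos h, hq]
      simp [Int.toNat_of_nonneg (by omega : (0:Int) ≤ r)]
    · have hq : pvQ strs x y r = false := by
        simp only [pvQ, List.any_eq_false]
        intro c hc
        simp only [Bool.and_eq_true, decide_eq_true_eq, not_and]
        intro h1 h2
        exact h ⟨c, hc, h1, h2⟩
      rw [if_neg h, hq]
      exact ih (fun r' hr' => hpos r' (by simp [hr']))

-- pvQ r = true ↔ some sublist of length r (r ≥ 0) is feasible
theorem pvQ_iff (strs : List String) (x y r : Int) (hr : 0 ≤ r) :
    pvQ strs x y r = true ↔
      ∃ c, c.Sublist strs ∧ (c.length : Int) = r ∧ pvZ c ≤ x ∧ pvO c ≤ y := by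
  simp only [pvQ, List.any_eq_true, pvCombos_mem, Bool.and_eq_true, decide_eq_true_eq]
  constructor
  · rintro ⟨c, ⟨hs, hl⟩, h1, h2⟩
    exact ⟨c, hs, by omega, h1, h2⟩
  · rintro ⟨c, hs, hl, h1, h2⟩
    exact ⟨c, ⟨hs, by omega⟩, h1, h2⟩


-- ---- B-side: the dict DP ----

theorem pvZ_append (a b : List String) : pvZ (a ++ b) = pvZ a + pvZ b := by
  simp [pvZ]

theorem pvO_append (a b : List String) : pvO (a ++ b) = pvO a + pvO b := by
  simp [pvO]

theorem pvZ_nonneg (c : List String) : 0 ≤ pvZ c := by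
  apply List.sum_nonneg
  intro a ha
  simp only [List.mem_map] at ha
  obtain ⟨e, _, rfl⟩ := ha
  positivity

theorem pvO_nonneg (c : List String) : 0 ≤ pvO c := by
  apply List.sum_nonneg
  intro a ha
  simp only [List.mem_map] at ha
  obtain ⟨e, _, rfl⟩ := ha
  positivity

-- downward closure: a shorter sub-subset has no larger totals
theorem pvFeas_take (strs c : List String) (hc : c.Sublist strs) (r' : Int)
    (h0 : 0 ≤ r') (hr : r' ≤ (c.length : Int)) :
    ∃ c', c'.Sublist strs ∧ (c'.length : Int) = r' ∧ pvZ c' ≤ pvZ c ∧ pvO c' ≤ pvO c := by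
  refine ⟨c.take r'.toNat, (List.take_sublist _ _).trans hc, ?_, ?_, ?_⟩
  · simp only [List.length_take]
    omega
  · conv_rhs => rw [← List.take_append_drop r'.toNat c]
    rw [pvZ_append]
    have := pvZ_nonneg (c.drop r'.toNat)
    omega
  · conv_rhs => rw [← List.take_append_drop r'.toNat c]
    rw [pvO_append]
    have := pvO_nonneg (c.drop r'.toNat)
    omega

-- the inner fold of pvStepD, abstracted over the deltas
def pvIns (z o : Int) (upd : PySem.Dict (Int × Int) Int) (kv : (Int × Int) × Int) :
    PySem.Dict (Int × Int) Int :=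
  if upd.getD (kv.1.1 + z, kv.1.2 + o) (-1) < kv.2 + 1
  then upd.insert (kv.1.1 + z, kv.1.2 + o) (kv.2 + 1) else upd

theorem pvStepD_eq (best : PySem.Dict (Int × Int) Int) (s : String) :
    pvStepD best s =
      best.items.foldl (pvIns (PySem.Str.count s "0" : Int) (PySem.Str.count s "1" : Int)) best := by
  rfl

theorem pvIns_getD_mono (z o : Int) (upd : PySem.Dict (Int × Int) Int)
    (kv : (Int × Int) × Int) (k : Int × Int) :
    upd.getD k (-1) ≤ (pvIns z o upd kv).getD k (-1) := by
  unfold pvIns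
  split_ifs with h
  · rw [PySem.Dict.getD_insert]
    split_ifs with hk
    · subst hk; omega
    · exact le_refl _
  · exact le_refl _

theorem pvFold_getD_mono (z o : Int) (L : List ((Int × Int) × Int))
    (upd : PySem.Dict (Int × Int) Int) (k : Int × Int) :
    upd.getD k (-1) ≤ (L.foldl (pvIns z o) upd).getD k (-1) := by
  induction L generalizing upd with
  | nil => exact le_refl _
  | cons kv L ih => exact (pvIns_getD_mono z o upd kv k).trans (ih _)

theorem pvFold_nodup_keys (z o : Int) (L : List ((Int × Int) × Int))
    (upd : PySem.Dict (Int × Int) Int) (h : upd.keys.Nodup) :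
    (L.foldl (pvIns z o) upd).keys.Nodup := by
  induction L generalizing upd with
  | nil => exact h
  | cons kv L ih =>
    apply ih
    unfold pvIns
    split_ifs with hg
    · exact PySem.Dict.nodup_keys_insert _ _ _ h
    · exact h

theorem pvFold_sound (z o : Int) (L : List ((Int × Int) × Int))
    (upd : PySem.Dict (Int × Int) Int) (Pw : (Int × Int) × Int → Prop)
    (hacc : ∀ kv ∈ upd.items, Pw kv)
    (hL : ∀ kv ∈ L, Pw ((kv.1.1 + z, kv.1.2 + o), kv.2 + 1)) :
    ∀ kv ∈ (L.foldl (pvIns z o) upd).items, Pw kv := by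
  induction L generalizing upd with
  | nil => exact hacc
  | cons kv0 L ih =>
    apply ih
    · intro kv hkv
      unfold pvIns at hkv
      split_ifs at hkv with hg
      · rcases (PySem.Dict.mem_items_insert _ _ _ _).mp hkv with rfl | ⟨hm, _⟩
        · exact hL kv0 (by simp)
        · exact hacc kv hm
      · exact hacc kv hkv
    · intro kv hkv
      exact hL kv (by simp [hkv])

theorem pvFold_hit (z o : Int) (L : List ((Int × Int) × Int))
    (kv0 : (Int × Int) × Int) (h0 : kv0 ∈ L) (upd : PySem.Dict (Int × Int) Int) :
    kv0.2 + 1 ≤ (L.foldl (pvIns z o) upd).getD (kv0.1.1 + z, kv0.1.2 + o) (-1) := by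
  induction L generalizing upd with
  | nil => simp at h0
  | cons kv L ih =>
    rcases List.mem_cons.mp h0 with rfl | hm
    · refine le_trans ?_ (pvFold_getD_mono z o L _ _)
      unfold pvIns
      split_ifs with hg
      · rw [PySem.Dict.getD_insert]; simp
      · omega
    · exact ih hm _

-- the DP invariant
def pvInv (p : List String) (d : PySem.Dict (Int × Int) Int) : Prop :=
  d.keys.Nodup ∧
  (∀ kv ∈ d.items, ∃ c, c.Sublist p ∧ pvZ c = kv.1.1 ∧ pvO c = kv.1.2 ∧ (c.length : Int) = kv.2) ∧
  (∀ c : List String, c.Sublist p → (c.length : Int) ≤ d.getD (pvZ c, pvO c) (-1))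

theorem pvInv_step (p : List String) (d : PySem.Dict (Int × Int) Int) (a : String)
    (h : pvInv p d) : pvInv (p ++ [a]) (pvStepD d a) := by
  obtain ⟨hnd, hsound, hcomp⟩ := h
  rw [pvStepD_eq]
  refine ⟨pvFold_nodup_keys _ _ _ _ hnd, ?_, ?_⟩
  · apply pvFold_sound
    · intro kv hkv
      obtain ⟨c, hc, h1, h2, h3⟩ := hsound kv hkv
      exact ⟨c, hc.trans (List.sublist_append_left p [a]), h1, h2, h3⟩
    · intro kv hkv
      obtain ⟨c, hc, h1, h2, h3⟩ := hsound kv hkv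
      refine ⟨c ++ [a], hc.append (List.Sublist.refl [a]), ?_, ?_, ?_⟩
      · simp only [pvZ, List.map_append, List.map_cons, List.map_nil, List.sum_append,
          List.sum_cons, List.sum_nil, add_zero] at h1 ⊢
        omega
      · simp only [pvO, List.map_append, List.map_cons, List.map_nil, List.sum_append,
          List.sum_cons, List.sum_nil, add_zero] at h2 ⊢
        omega
      · simp; omega
  · intro c hc
    rw [List.sublist_append_iff] at hc
    obtain ⟨u, t, rfl, hu, ht⟩ := hc
    rcases List.sublist_singleton.mp ht with rfl | rfl
    · rw [List.append_nil]
      exact (hcomp u hu).trans (pvFold_getD_mono _ _ _ _ _)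
    · have hg := hcomp u hu
      have hg0 : 0 ≤ d.getD (pvZ u, pvO u) (-1) := le_trans (by positivity) hg
      have hget : d.get? (pvZ u, pvO u) = some (d.getD (pvZ u, pvO u) (-1)) := by
        rw [PySem.Dict.getD_eq_get?_getD] at hg0 ⊢
        cases hq : d.get? (pvZ u, pvO u) with
        | none => rw [hq] at hg0; simp at hg0
        | some v => simp
      have hmem := PySem.Dict.mem_items_of_get?_eq_some _ hget
      have hhit := pvFold_hit (PySem.Str.count a "0" : Int) (PySem.Str.count a "1" : Int)
        d.items ((pvZ u, pvO u), d.getD (pvZ u, pvO u) (-1)) hmem d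
      simp only at hhit
      have hz : pvZ (u ++ [a]) = pvZ u + (PySem.Str.count a "0" : Int) := by
        rw [pvZ_append]; simp [pvZ]
      have ho : pvO (u ++ [a]) = pvO u + (PySem.Str.count a "1" : Int) := by
        rw [pvO_append]; simp [pvO]
      rw [hz, ho]
      simp only [List.length_append, List.length_singleton]
      push_cast
      omega

theorem pvInv_foldl (l : List String) (p : List String) (d : PySem.Dict (Int × Int) Int)
    (h : pvInv p d) : pvInv (p ++ l) (l.foldl pvStepD d) := by
  induction l generalizing p d with
  | nil => simpa using h
  | cons a l ih =>
    have h1 := pvInv_step p d a h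
    have h2 := ih (p ++ [a]) (pvStepD d a) h1
    simpa using h2

theorem pvInv_best (strs : List String) :
    pvInv strs (strs.foldl pvStepD (PySem.Dict.ofList [(((0 : Int), (0 : Int)), (0 : Int))])) := by
  have h0 : pvInv [] (PySem.Dict.ofList [(((0 : Int), (0 : Int)), (0 : Int))]) := by
    refine ⟨?_, ?_, ?_⟩
    · decide
    · intro kv hkv
      have hit : (PySem.Dict.ofList [(((0 : Int), (0 : Int)), (0 : Int))]).items
          = [(((0 : Int), (0 : Int)), (0 : Int))] := by decide
      rw [hit] at hkv
      have : kv = (((0 : Int), (0 : Int)), (0 : Int)) := by simpa using hkv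
      subst this
      exact ⟨[], List.nil_sublist _, by simp [pvZ], by simp [pvO], by simp⟩
    · intro c hc
      rw [List.sublist_nil.mp hc]
      simp [pvZ, pvO]
      decide
  simpa using pvInv_foldl strs [] _ h0

-- ---- B-side: the final max loop ----

def pvCand (x y n : Int) (kv : (Int × Int) × Int) : Prop :=
  kv.1.1 ≤ x ∧ kv.1.2 ≤ y ∧ 2 ≤ min kv.2 (n - 1)

theorem pvResStep_some (x y n : Int) (res : Option Int) (kv : (Int × Int) × Int) (m : Int)
    (h : pvResStep x y n res kv = some m) :
    res = some m ∨ (pvCand x y n kv ∧ m = min kv.2 (n - 1)) := by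
  unfold pvResStep at h
  split_ifs at h with h1 h2
  · simp only [Bool.and_eq_true, decide_eq_true_eq] at h2
    exact Or.inr ⟨⟨h1.1, h1.2, h2.1⟩, ((Option.some.injEq _ _).mp h).symm⟩
  · exact Or.inl h
  · exact Or.inl h

theorem pvResStep_acc_le (x y n : Int) (res : Option Int) (kv : (Int × Int) × Int) (v : Int)
    (h : res = some v) : ∃ m, pvResStep x y n res kv = some m ∧ v ≤ m := by
  subst h
  unfold pvResStep
  split_ifs with h1 h2
  · simp only [Bool.and_eq_true, Option.all_some, decide_eq_true_eq] at h2
    exact ⟨min kv.2 (n - 1), rfl, le_of_lt h2.2⟩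
  · exact ⟨v, rfl, le_refl v⟩
  · exact ⟨v, rfl, le_refl v⟩

theorem pvResFold_acc_le (x y n : Int) (L : List ((Int × Int) × Int)) (res : Option Int) (v : Int)
    (h : res = some v) : ∃ m, L.foldl (pvResStep x y n) res = some m ∧ v ≤ m := by
  induction L generalizing res v with
  | nil => exact ⟨v, by simpa using h, le_refl v⟩
  | cons kv L ih =>
    obtain ⟨m1, hm1, hv1⟩ := pvResStep_acc_le x y n res kv v h
    obtain ⟨m, hm, hv⟩ := ih (pvResStep x y n res kv) m1 hm1
    exact ⟨m, hm, le_trans hv1 hv⟩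

theorem pvResFold_some (x y n : Int) (L : List ((Int × Int) × Int)) (res : Option Int) (m : Int)
    (h : L.foldl (pvResStep x y n) res = some m) :
    res = some m ∨ ∃ kv ∈ L, pvCand x y n kv ∧ m = min kv.2 (n - 1) := by
  induction L generalizing res with
  | nil => exact Or.inl (by simpa using h)
  | cons kv L ih =>
    rcases ih (pvResStep x y n res kv) (by simpa using h) with h1 | ⟨kv', hm, hc⟩
    · rcases pvResStep_some x y n res kv m h1 with h2 | h2
      · exact Or.inl h2
      · exact Or.inr ⟨kv, by simp, h2⟩
    · exact Or.inr ⟨kv', by simp [hm], hc⟩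

theorem pvResFold_hit (x y n : Int) (L : List ((Int × Int) × Int)) (res : Option Int)
    (kv0 : (Int × Int) × Int) (h0 : kv0 ∈ L) (hc : pvCand x y n kv0) :
    ∃ m, L.foldl (pvResStep x y n) res = some m ∧ min kv0.2 (n - 1) ≤ m := by
  induction L generalizing res with
  | nil => simp at h0
  | cons kv L ih =>
    rcases List.mem_cons.mp h0 with rfl | hm
    · have : ∃ v, pvResStep x y n res kv0 = some v ∧ min kv0.2 (n - 1) ≤ v := by
        unfold pvResStep
        rw [if_pos ⟨hc.1, hc.2.1⟩]
        split_ifs with h2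
        · exact ⟨min kv0.2 (n - 1), rfl, le_refl _⟩
        · cases res with
          | none =>
            exfalso
            simp only [Option.all_none, Bool.and_true, decide_eq_true_eq] at h2
            exact h2 hc.2.2
          | some v =>
            simp only [Option.all_some, Bool.and_eq_true, decide_eq_true_eq, not_and, not_lt] at h2
            exact ⟨v, rfl, h2 hc.2.2⟩
      obtain ⟨v, hv, hle⟩ := this
      obtain ⟨m, hm', hvm⟩ := pvResFold_acc_le x y n L _ v hv
      exact ⟨m, hm', le_trans hle hvm⟩
    · exact ih _ hm


-- ===== VERDICT (by name: the statement is the Claim_ definition above) =====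
theorem return_subset_spec : Claim_equal_return_subset := by
  intro strs x y _
  unfold Spec_return_subset
  have hrange : ∀ r ∈ PySem.List.pyRange ((strs.length : Int) - 1) 1 (-1), 1 ≤ r := by
    intro r hr
    have := (PySem.List.mem_pyRange_neg_one).mp hr
    omega
  have hA : return_subset strs x y
      = (PySem.List.pyRange ((strs.length : Int) - 1) 1 (-1)).find? (pvQ strs x y) := by
    unfold return_subset; exact pvOuterA_eq_find strs x y _ hrange
  have hB : return_subset_alt strs x y =
      (strs.foldl pvStepD (PySem.Dict.ofList [(((0 : Int), (0 : Int)), (0 : Int))])).items.foldl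
        (pvResStep x y (strs.length : Int)) none := rfl
  rw [hA, hB]
  obtain ⟨hnd, hsound, hcomp⟩ := pvInv_best strs
  set n : Int := (strs.length : Int) with hn
  set best := strs.foldl pvStepD (PySem.Dict.ofList [(((0 : Int), (0 : Int)), (0 : Int))]) with hbest
  have fact1 : ∀ kv ∈ best.items, pvCand x y n kv →
      pvQ strs x y (min kv.2 (n - 1)) = true ∧ 2 ≤ min kv.2 (n - 1) ∧ min kv.2 (n - 1) ≤ n - 1 := by
    intro kv hkv ⟨hcx, hcy, hc2⟩
    obtain ⟨c, hc, h1, h2, h3⟩ := hsound kv hkv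
    obtain ⟨c', hc', hl', hz', ho'⟩ := pvFeas_take strs c hc (min kv.2 (n - 1)) (by omega) (by omega)
    refine ⟨(pvQ_iff strs x y _ (by omega)).mpr ⟨c', hc', hl', by omega, by omega⟩, hc2, by omega⟩
  have fact2 : ∀ r : Int, 2 ≤ r → r ≤ n - 1 → pvQ strs x y r = true →
      ∃ kv ∈ best.items, pvCand x y n kv ∧ r ≤ min kv.2 (n - 1) := by
    intro r h2 hn1 hq
    obtain ⟨c, hc, hl, hzx, hoy⟩ := (pvQ_iff strs x y r (by omega)).mp hq
    have hg := hcomp c hc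
    have hg0 : 0 ≤ best.getD (pvZ c, pvO c) (-1) := by omega
    have hget : best.get? (pvZ c, pvO c) = some (best.getD (pvZ c, pvO c) (-1)) := by
      rw [PySem.Dict.getD_eq_get?_getD] at hg0 ⊢
      cases hq' : best.get? (pvZ c, pvO c) with
      | none => rw [hq'] at hg0; simp at hg0
      | some v => simp
    refine ⟨((pvZ c, pvO c), best.getD (pvZ c, pvO c) (-1)),
      PySem.Dict.mem_items_of_get?_eq_some _ hget, ⟨by simpa using hzx, by simpa using hoy, ?_⟩, ?_⟩
    · simp only
      omega
    · simp only
      omega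
  cases hfind : (PySem.List.pyRange (n - 1) 1 (-1)).find? (pvQ strs x y) with
  | none =>
    have hnone : ∀ r ∈ PySem.List.pyRange (n - 1) 1 (-1), ¬ pvQ strs x y r :=
      List.find?_eq_none.mp hfind
    cases hres : best.items.foldl (pvResStep x y n) none with
    | none => rfl
    | some m =>
      exfalso
      rcases pvResFold_some x y n best.items none m hres with h | ⟨kv, hkv, hcand, rfl⟩
      · simp at h
      · obtain ⟨hq, hm2, hm3⟩ := fact1 kv hkv hcand
        exact hnone _ ((PySem.List.mem_pyRange_neg_one).mpr ⟨by omega, by omega⟩) hq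
  | some r =>
    have hq := List.find?_some hfind
    have hrb := (PySem.List.mem_pyRange_neg_one).mp (List.mem_of_find?_eq_some hfind)
    obtain ⟨kv, hkv, hcand, hrle⟩ := fact2 r (by omega) (by omega) hq
    obtain ⟨m, hm, hge⟩ := pvResFold_hit x y n best.items none kv hkv hcand
    rw [hm]
    rcases pvResFold_some x y n best.items none m hm with h | ⟨kv', hkv', hcand', rfl⟩
    · simp at h
    · obtain ⟨hq', hm2, hm3⟩ := fact1 kv' hkv' hcand'
      have hmr : min kv'.2 (n - 1) ≤ r := by
        by_contra hlt
        have hlt : r < min kv'.2 (n - 1) := by omega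
        have hmrange : min kv'.2 (n - 1) ∈ PySem.List.pyRange (n - 1) 1 (-1) :=
          (PySem.List.mem_pyRange_neg_one).mpr ⟨by omega, by omega⟩
        have hpair : (PySem.List.pyRange (n - 1) 1 (-1)).Pairwise (· > ·) := by
          rw [PySem.List.pyRange_neg_one_eq_reverse, List.pairwise_reverse]
          exact PySem.List.pairwise_lt_pyRange_one _ _
        have := pvFind_desc _ _ _ hpair hfind _ hmrange hlt
        rw [hq'] at this
        exact absurd this (by simp)
      have : min kv'.2 (n - 1) = r := by omega
      rw [this]
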